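-- pv_equiv track=rewrite | github.com/sabare20/tbc_group_project_1 | group_project_1/tie_functions.py | max_colours_count
-- ===== SOURCE A (Python) =====
-- def max_colours_count(cards_for_colour):
--     players_max_colour_count = {}
--     for player, cards in cards_for_colour.items():
--         cards_colour_dict = {}
--         for card in cards:
--             card_colour = card[-1]
--             cards_colour_dict[card_colour] = cards_colour_dict.get(card_colour, 0) + 1
--         max_colour_count = max(cards_colour_dict.values())
--         players_max_colour_count[player] = max_colour_count
--     return players_max_colour_count
-- ===== SOURCE B (Python) =====
-- def max_colours_count(cards_for_colour):
--     result = {}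
--     for player, cards in cards_for_colour.items():
--         result[player] = max(sum(1 for d in cards if d[-1] == c[-1]) for c in cards)
--     return result
-- ===== Notes on version B (the rewrite author's own statement) =====
-- stated objective: simpler
-- what changed: Replaces the per-player colour-frequency dict (hash-count then max over values) with a direct one-line maximum over each card of the number of same-colour cards, so no intermediate dict is built.
import Mathlib
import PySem

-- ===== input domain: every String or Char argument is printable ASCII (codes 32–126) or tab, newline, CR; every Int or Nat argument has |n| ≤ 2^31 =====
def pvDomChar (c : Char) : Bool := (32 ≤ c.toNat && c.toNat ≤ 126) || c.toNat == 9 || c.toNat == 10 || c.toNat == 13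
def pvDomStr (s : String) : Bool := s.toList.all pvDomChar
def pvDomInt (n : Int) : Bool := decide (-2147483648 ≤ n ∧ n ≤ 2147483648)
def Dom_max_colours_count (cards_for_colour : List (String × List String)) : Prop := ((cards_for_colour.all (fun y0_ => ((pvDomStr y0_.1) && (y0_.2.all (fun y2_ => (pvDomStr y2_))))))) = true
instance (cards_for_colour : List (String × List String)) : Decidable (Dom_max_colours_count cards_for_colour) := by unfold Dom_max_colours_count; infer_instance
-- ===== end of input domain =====

-- B replaces A's per-player colour-frequency dict with a direct maximum, over the cards, of the
-- number of same-colour cards (simpler: no intermediate dict; not faster).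

-- ===== PORT A =====
def max_colours_count (cards_for_colour : List (String × List String)) : List (String × Int) :=
  (cards_for_colour.foldl (fun players_max_colour_count pc =>
      let cards_colour_dict : PySem.Dict (Option Char) Int :=
        pc.2.foldl (fun d card =>
          let card_colour := PySem.Str.pyGet? card (-1)
          d.insert card_colour (d.getD card_colour 0 + 1)) PySem.Dict.empty
      let max_colour_count := (PySem.List.max? cards_colour_dict.values (fun v => v)).getD 0
      players_max_colour_count.insert pc.1 max_colour_count)
    PySem.Dict.empty).items

-- ===== PORT B =====
def max_colours_count_alt (cards_for_colour : List (String × List String)) : List (String × Int) :=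
  (cards_for_colour.foldl (fun result pc =>
      result.insert pc.1
        ((PySem.List.max?
            (pc.2.map (fun c =>
              ((pc.2.countP (fun d => PySem.Str.pyGet? d (-1) == PySem.Str.pyGet? c (-1))) : Int)))
            (fun v => v)).getD 0))
    PySem.Dict.empty).items

-- ===== PRECONDITION & SPEC =====
-- Pre_ excludes exactly the inputs where the Python A raises: an empty card list (ValueError from
-- max over an empty dict's values) or an empty card string (IndexError from card[-1]).
def Pre_max_colours_count (cards_for_colour : List (String × List String)) : Prop :=
  ∀ pc ∈ cards_for_colour, pc.2 ≠ [] ∧ ∀ card ∈ pc.2, card ≠ ""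
instance (cards_for_colour : List (String × List String)) : Decidable (Pre_max_colours_count cards_for_colour) := by unfold Pre_max_colours_count; infer_instance
def pvWitness_max_colours_count : (List (String × List String)) :=
  [("alice", ["2r", "5g", "7r"]), ("bob", ["b"])]

def Spec_max_colours_count (cards_for_colour : List (String × List String)) (out : List (String × Int)) : Prop := out = max_colours_count_alt cards_for_colour
instance (cards_for_colour : List (String × List String)) (out : List (String × Int)) : Decidable (Spec_max_colours_count cards_for_colour out) := by unfold Spec_max_colours_count; infer_instance

-- ===== CLAIM (what is proved, stated in full; the proofs are below) =====
def Claim_equal_max_colours_count : Prop := ∀ (cards_for_colour : List (String × List String)), Dom_max_colours_count cards_for_colour → Pre_max_colours_count cards_for_colour → Spec_max_colours_count cards_for_colour (max_colours_count cards_for_colour)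

-- ===== LEMMAS AND PROOFS =====

-- max (with the identity key) only depends on the members of the list.
lemma pv_max_eq_of_mutual_mem (l1 l2 : List Int)
    (h12 : ∀ x ∈ l1, x ∈ l2) (h21 : ∀ x ∈ l2, x ∈ l1) :
    (PySem.List.max? l1 (fun v => v)).getD 0 = (PySem.List.max? l2 (fun v => v)).getD 0 := by
  cases h1 : PySem.List.max? l1 (fun v => v) with
  | none =>
      have e1 : l1 = [] := (PySem.List.max?_eq_none_iff l1 (fun v => v)).mp h1
      subst e1
      have e2 : l2 = [] := by
        cases l2 with
        | nil => rfl
        | cons y t => exact absurd (h21 y (List.mem_cons_self)) (by simp)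
      subst e2; rfl
  | some m1 =>
      cases h2 : PySem.List.max? l2 (fun v => v) with
      | none =>
          have e2 : l2 = [] := (PySem.List.max?_eq_none_iff l2 (fun v => v)).mp h2
          subst e2
          exact absurd (h12 m1 (PySem.List.max?_mem h1)) (by simp)
      | some m2 =>
          have le1 : m1 ≤ m2 := PySem.List.max?_isMax h2 m1 (h12 m1 (PySem.List.max?_mem h1))
          have le2 : m2 ≤ m1 := PySem.List.max?_isMax h1 m2 (h21 m2 (PySem.List.max?_mem h2))
          simp [le_antisymm le1 le2]

-- per-player value: A's max over the counter's values = B's max over per-card counts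
lemma pv_player_eq (cards : List String) :
    (PySem.List.max?
      (PySem.Dict.values (cards.foldl (fun d card =>
          let card_colour := PySem.Str.pyGet? card (-1)
          d.insert card_colour (d.getD card_colour 0 + 1)) PySem.Dict.empty))
      (fun v => v)).getD 0
    = (PySem.List.max?
        (cards.map (fun c =>
          ((cards.countP (fun d => PySem.Str.pyGet? d (-1) == PySem.Str.pyGet? c (-1))) : Int)))
        (fun v => v)).getD 0 := by
  have hfold : (cards.foldl (fun d card =>
      let card_colour := PySem.Str.pyGet? card (-1)
      d.insert card_colour (d.getD card_colour 0 + 1)) PySem.Dict.empty)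
      = PySem.Dict.counter (cards.map (fun card => PySem.Str.pyGet? card (-1))) := by
    rw [← PySem.Dict.foldl_insert_getD_add_one_eq_counter, List.foldl_map]
  rw [hfold]
  have hB : (cards.map (fun c =>
        ((cards.countP (fun d => PySem.Str.pyGet? d (-1) == PySem.Str.pyGet? c (-1))) : Int)))
      = (cards.map (fun card => PySem.Str.pyGet? card (-1))).map
          (fun k => (((cards.map (fun card => PySem.Str.pyGet? card (-1))).count k : Nat) : Int)) := by
    rw [List.map_map]
    refine List.map_congr_left (fun c _ => ?_)
    simp [List.count, List.countP_map, Function.comp_def]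
  rw [hB]
  set L := cards.map (fun card => PySem.Str.pyGet? card (-1)) with hL
  have hvals : (PySem.Dict.counter L).values = (PySem.Set.ofList L).map (fun k => ((L.count k : Nat) : Int)) := by
    show ((PySem.Dict.counter L).items).map (·.2) = _
    rw [PySem.Dict.items_counter L, List.map_map]
    rfl
  rw [hvals]
  apply pv_max_eq_of_mutual_mem
  · intro x hx
    rcases List.mem_map.mp hx with ⟨k, hk, rfl⟩
    exact List.mem_map.mpr ⟨k, (PySem.Set.mem_ofList L k).mp hk, rfl⟩
  · intro x hx
    rcases List.mem_map.mp hx with ⟨k, hk, rfl⟩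
    exact List.mem_map.mpr ⟨k, (PySem.Set.mem_ofList L k).mpr hk, rfl⟩

-- ===== VERDICT (by name: the statement is the Claim_ definition above) =====
theorem max_colours_count_spec : Claim_equal_max_colours_count := by
  intro cfc _ _
  unfold Spec_max_colours_count max_colours_count max_colours_count_alt
  congr 1
  apply congrFun
  congr 1
  funext acc pc
  exact congrArg (acc.insert pc.1) (pv_player_eq pc.2)
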